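-- pv_equiv track=rewrite | github.com/Piplopp/knapstack-problem | strategies.py | fillBoxesStrategy2
-- ===== SOURCE A (Python) =====
-- def fillBoxesStrategy2(objectsDictionnary, nbBoxes):
-- 	listOfBoxes = [[] for i in range(nbBoxes)]
-- 	listOfValues = [0]*nbBoxes
--
-- 	list_keys = objectsDictionnary.keys(); #list_keys.sort(); list_keys = list_keys[::-1]
--
-- 	for i in list_keys:
-- 		index_min=listOfValues.index(min(listOfValues)) #get index of min value (same for the keys)
-- 		listOfBoxes[index_min].append(i)
-- 		listOfValues[index_min]+=objectsDictionnary[i]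
--
-- 	return listOfBoxes
-- ===== SOURCE B (Python) =====
-- # Priority queue kept as a list of (load, index) pairs sorted ascending: the least-loaded
-- # box (ties: lowest index) is always at the front; re-insertion uses a hand-written binary
-- # search, replacing A's per-object min()+.index() rescans of the load list.
--
-- def fillBoxesStrategy2(objectsDictionnary, nbBoxes):
--     boxes = [[] for _ in range(nbBoxes)]
--     queue = [(0, i) for i in range(nbBoxes)]  # sorted by (load, index)
--     for key, weight in objectsDictionnary.items():
--         load, idx = queue.pop(0)
--         boxes[idx].append(key)
--         item = (load + weight, idx)
--         lo, hi = 0, len(queue)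
--         while lo < hi:
--             mid = (lo + hi) // 2
--             if queue[mid] < item:
--                 lo = mid + 1
--             else:
--                 hi = mid
--         queue.insert(lo, item)
--     return boxes
-- ===== Notes on version B (the rewrite author's own statement) =====
-- stated objective: faster
-- what changed: B keeps a priority queue (a list of (load, index) pairs kept sorted, head = least-loaded box, re-insertion by hand-written binary search) instead of A's per-object min() scan plus .index() scan over the load list.
import Mathlib
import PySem

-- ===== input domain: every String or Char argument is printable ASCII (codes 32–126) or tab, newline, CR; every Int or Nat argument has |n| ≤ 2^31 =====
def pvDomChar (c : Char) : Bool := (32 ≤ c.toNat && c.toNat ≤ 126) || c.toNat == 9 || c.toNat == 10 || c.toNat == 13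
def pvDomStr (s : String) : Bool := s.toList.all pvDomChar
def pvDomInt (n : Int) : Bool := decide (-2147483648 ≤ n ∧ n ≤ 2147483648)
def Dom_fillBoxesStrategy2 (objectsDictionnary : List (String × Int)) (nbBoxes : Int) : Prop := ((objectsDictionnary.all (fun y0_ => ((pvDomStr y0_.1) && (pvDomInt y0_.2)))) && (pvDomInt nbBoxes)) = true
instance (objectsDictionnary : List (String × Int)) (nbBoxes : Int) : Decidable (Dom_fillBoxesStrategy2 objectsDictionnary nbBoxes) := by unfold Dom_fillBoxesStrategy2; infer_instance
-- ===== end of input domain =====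

-- B replaces A's per-object min()+.index() rescans of the load list by a priority queue:
-- a sorted list of (load, index) pairs, head popped and re-inserted by binary search
-- (objective: faster; a timing run measured B faster at the largest sizes).

-- ===== PORT A =====
-- one loop body of A: find the first index of the minimal load, append the key there, add its weight
def pvStepA (d : List (String × Int)) (st : List (List String) × List Int) (k : String) :
    List (List String) × List Int :=
  match PySem.List.min? st.2 (fun x => x) with
  | none => st   -- Python: min([]) raises ValueError (excluded by Pre_)
  | some m =>
      let j := (PySem.List.index? st.2 m).getD 0
      (st.1.set j (st.1.getD j [] ++ [k]),
       st.2.set j (st.2.getD j 0 + (PySem.Dict.mk d).getD k 0))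

def fillBoxesStrategy2 (objectsDictionnary : List (String × Int)) (nbBoxes : Int) : List (List String) :=
  let listOfBoxes : List (List String) := (PySem.List.pyRange 0 nbBoxes 1).map (fun _ => [])
  let listOfValues : List Int := List.replicate nbBoxes.toNat 0
  let list_keys := (PySem.Dict.mk objectsDictionnary).keys
  (list_keys.foldl (pvStepA objectsDictionnary) (listOfBoxes, listOfValues)).1

-- ===== PORT B =====
-- Python tuple comparison (load, index) < (load', index')
def pvLtB (a b : Int × Int) : Bool := a.1 < b.1 || (a.1 == b.1 && a.2 < b.2)

-- the while-loop binary search: first position in q[lo:hi] not strictly below item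
-- (q.getD is exact here: the loop only reads q[mid] with mid < hi ≤ len(q))
def pvBisect (q : List (Int × Int)) (item : Int × Int) (lo hi : Nat) : Nat :=
  if lo < hi then
    let mid := (lo + hi) / 2
    if pvLtB (q.getD mid (0, 0)) item then pvBisect q item (mid + 1) hi
    else pvBisect q item lo mid
  else lo
termination_by hi - lo
decreasing_by all_goals omega

-- one loop body of B: pop the queue head, append the key to that box,
-- binary-search the new (load, index) pair back into the sorted queue
def pvStepB (st : List (List String) × List (Int × Int)) (kv : String × Int) :
    List (List String) × List (Int × Int) :=
  match st.2 with
  | [] => st   -- Python: queue[0] raises IndexError (excluded by Pre_)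
  | (load, idx) :: rest =>
      let item : Int × Int := (load + kv.2, idx)
      (st.1.set idx.toNat (st.1.getD idx.toNat [] ++ [kv.1]),
       rest.insertIdx (pvBisect rest item 0 rest.length) item)
      -- List.insertIdx is exact for queue.insert(lo, item): 0 ≤ lo ≤ len(queue)

def fillBoxesStrategy2_alt (objectsDictionnary : List (String × Int)) (nbBoxes : Int) : List (List String) :=
  let boxes : List (List String) := (PySem.List.pyRange 0 nbBoxes 1).map (fun _ => [])
  let queue : List (Int × Int) := (PySem.List.pyRange 0 nbBoxes 1).map (fun i => (0, i))
  (objectsDictionnary.foldl pvStepB (boxes, queue)).1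

-- ===== PRECONDITION & SPEC =====
-- Pre_ excludes (i) association lists with duplicate keys, which cannot arise from the Python
-- dict argument, and (ii) a nonempty dictionary with nbBoxes ≤ 0, on which BOTH Pythons raise
-- (A a ValueError from min([]), B an IndexError from queue[0]).
def Pre_fillBoxesStrategy2 (objectsDictionnary : List (String × Int)) (nbBoxes : Int) : Prop :=
  (objectsDictionnary.map Prod.fst).Nodup ∧ (objectsDictionnary = [] ∨ 1 ≤ nbBoxes)
instance (objectsDictionnary : List (String × Int)) (nbBoxes : Int) : Decidable (Pre_fillBoxesStrategy2 objectsDictionnary nbBoxes) := by unfold Pre_fillBoxesStrategy2; infer_instance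
def pvWitness_fillBoxesStrategy2 : (List (String × Int)) × Int := ([("a", 1), ("b", 2)], 2)

def Spec_fillBoxesStrategy2 (objectsDictionnary : List (String × Int)) (nbBoxes : Int) (out : List (List String)) : Prop := out = fillBoxesStrategy2_alt objectsDictionnary nbBoxes
instance (objectsDictionnary : List (String × Int)) (nbBoxes : Int) (out : List (List String)) : Decidable (Spec_fillBoxesStrategy2 objectsDictionnary nbBoxes out) := by unfold Spec_fillBoxesStrategy2; infer_instance

-- ===== CLAIM (what is proved, stated in full; the proofs are below) =====
def Claim_equal_fillBoxesStrategy2 : Prop := ∀ (objectsDictionnary : List (String × Int)) (nbBoxes : Int), Dom_fillBoxesStrategy2 objectsDictionnary nbBoxes → Pre_fillBoxesStrategy2 objectsDictionnary nbBoxes → Spec_fillBoxesStrategy2 objectsDictionnary nbBoxes (fillBoxesStrategy2 objectsDictionnary nbBoxes)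

-- ===== LEMMAS AND PROOFS =====

-- proof-side model of one sorted insertion (what the binary search + insert amounts to)
def pvInsertSorted (q : List (Int × Int)) (x : Int × Int) : List (Int × Int) :=
  match q with
  | [] => [x]
  | h :: t => if pvLtB h x then h :: pvInsertSorted t x else x :: h :: t

-- the load list of A seen as the multiset of (load, index) pairs B's queue holds
def pairsOf (v : List Int) : List (Int × Int) := v.zipIdx.map (fun p => (p.1, (p.2 : Int)))

def pvLe (a b : Int × Int) : Prop := pvLtB b a = false

lemma pvLtB_iff (a b : Int × Int) : pvLtB a b = true ↔ (a.1 < b.1 ∨ (a.1 = b.1 ∧ a.2 < b.2)) := by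
  simp [pvLtB]

lemma pvLe_iff (a b : Int × Int) : pvLe a b ↔ (a.1 < b.1 ∨ (a.1 = b.1 ∧ a.2 ≤ b.2)) ∨ a = b := by
  rcases a with ⟨a1, a2⟩; rcases b with ⟨b1, b2⟩
  simp only [pvLe, pvLtB, Prod.mk.injEq, Bool.or_eq_false_iff, Bool.and_eq_false_iff,
    decide_eq_false_iff_not, not_lt, beq_eq_false_iff_ne, ne_eq]
  constructor
  · intro h; omega
  · intro h; omega

lemma pvLe_antisymm {a b : Int × Int} (h1 : pvLe a b) (h2 : pvLe b a) : a = b := by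
  rw [pvLe_iff] at h1 h2
  rcases a with ⟨a1, a2⟩; rcases b with ⟨b1, b2⟩
  simp only [Prod.mk.injEq] at *
  omega

lemma pvLe_trans {a b c : Int × Int} (h1 : pvLe a b) (h2 : pvLe b c) : pvLe a c := by
  rw [pvLe_iff] at *
  rcases a with ⟨a1, a2⟩; rcases b with ⟨b1, b2⟩; rcases c with ⟨c1, c2⟩
  simp only [Prod.mk.injEq] at *
  omega

lemma pvLe_of_not_lt {a b : Int × Int} (h : pvLtB a b = false) : pvLe b a := h

lemma pvLe_of_lt {a b : Int × Int} (h : pvLtB a b = true) : pvLe a b := by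
  rw [pvLtB_iff] at h
  rw [pvLe_iff]
  rcases a with ⟨a1, a2⟩; rcases b with ⟨b1, b2⟩
  simp only [Prod.mk.injEq] at *
  omega

lemma mem_pvInsertSorted {y x : Int × Int} {q : List (Int × Int)} :
    y ∈ pvInsertSorted q x ↔ y = x ∨ y ∈ q := by
  induction q with
  | nil => simp [pvInsertSorted]
  | cons h t ih =>
      simp only [pvInsertSorted]
      split
      · rw [List.mem_cons, ih, List.mem_cons]; tauto
      · simp only [List.mem_cons]

lemma perm_pvInsertSorted (q : List (Int × Int)) (x : Int × Int) :
    (pvInsertSorted q x).Perm (x :: q) := by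
  induction q with
  | nil => simp [pvInsertSorted]
  | cons h t ih =>
      simp only [pvInsertSorted]
      split
      · exact ((ih.cons h).trans (List.Perm.swap x h t))
      · exact List.Perm.refl _

lemma pairwise_pvInsertSorted {q : List (Int × Int)} (x : Int × Int)
    (h : q.Pairwise pvLe) : (pvInsertSorted q x).Pairwise pvLe := by
  induction q with
  | nil => simp [pvInsertSorted]
  | cons a t ih =>
      rcases List.pairwise_cons.mp h with ⟨ha, ht⟩
      simp only [pvInsertSorted]
      split
      · rename_i hlt
        refine List.pairwise_cons.mpr ⟨?_, ih ht⟩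
        intro y hy
        rcases mem_pvInsertSorted.mp hy with rfl | hy
        · exact pvLe_of_lt hlt
        · exact ha y hy
      · rename_i hlt
        refine List.pairwise_cons.mpr ⟨?_, h⟩
        intro y hy
        rcases List.mem_cons.mp hy with rfl | hy
        · exact pvLe_of_not_lt (by simpa using hlt)
        · exact pvLe_trans (pvLe_of_not_lt (by simpa using hlt)) (ha y hy)

lemma pvLtB_of_le_of_lt {a b c : Int × Int} (h1 : pvLe a b) (h2 : pvLtB b c = true) :
    pvLtB a c = true := by
  rw [pvLe_iff] at h1
  rw [pvLtB_iff] at *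
  rcases a with ⟨a1, a2⟩; rcases b with ⟨b1, b2⟩; rcases c with ⟨c1, c2⟩
  simp only [Prod.mk.injEq] at *
  omega

-- the binary search returns a split point of the sorted queue around item
lemma pvBisect_spec (q : List (Int × Int)) (item : Int × Int) (hs : q.Pairwise pvLe) :
    ∀ (n lo hi : Nat), hi - lo ≤ n → lo ≤ hi → hi ≤ q.length →
    (∀ i (h : i < q.length), i < lo → pvLtB q[i] item = true) →
    (∀ i (h : i < q.length), hi ≤ i → pvLtB q[i] item = false) →
    pvBisect q item lo hi ≤ q.length ∧
    (∀ i (h : i < q.length), i < pvBisect q item lo hi → pvLtB q[i] item = true) ∧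
    (∀ i (h : i < q.length), pvBisect q item lo hi ≤ i → pvLtB q[i] item = false) := by
  intro n
  induction n with
  | zero =>
      intro lo hi hn hle hhi hlo' hhi'
      have hnl : ¬ lo < hi := by omega
      rw [pvBisect, if_neg hnl]
      exact ⟨by omega, fun i h hi' => hlo' i h hi', fun i h hi' => hhi' i h (by omega)⟩
  | succ n ih =>
      intro lo hi hn hle hhi hlo' hhi'
      rw [pvBisect]
      by_cases hlt : lo < hi
      · rw [if_pos hlt]
        have hmlen : (lo + hi) / 2 < q.length := by omega
        by_cases hcond : pvLtB (q.getD ((lo + hi) / 2) (0, 0)) item = true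
        · rw [if_pos hcond]
          rw [List.getD_eq_getElem q (0,0) hmlen] at hcond
          refine ih ((lo + hi) / 2 + 1) hi (by omega) (by omega) hhi ?_ hhi'
          intro i hilen hi'
          rcases Nat.lt_or_ge i ((lo + hi) / 2) with hc | hc
          · exact pvLtB_of_le_of_lt
              ((List.pairwise_iff_getElem.mp hs) i _ hilen hmlen hc) hcond
          · have : i = (lo + hi) / 2 := by omega
            subst this
            exact hcond
        · rw [if_neg hcond]
          rw [List.getD_eq_getElem q (0,0) hmlen] at hcond
          refine ih lo ((lo + hi) / 2) (by omega) (by omega) (by omega) hlo' ?_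
          intro i hilen hi'
          rcases Nat.lt_or_ge ((lo + hi) / 2) i with hc | hc
          · rcases h : pvLtB q[i] item with _ | _
            · rfl
            · exact absurd (pvLtB_of_le_of_lt
                ((List.pairwise_iff_getElem.mp hs) _ i hmlen hilen hc) h) hcond
          · have : i = (lo + hi) / 2 := by omega
            subst this
            simpa using hcond
      · rw [if_neg hlt]
        exact ⟨by omega, fun i h hi' => hlo' i h hi', fun i h hi' => hhi' i h (by omega)⟩

-- inserting at such a split point is exactly the linear sorted insertion
lemma insertIdx_eq_pvInsertSorted (item : Int × Int) :
    ∀ (q : List (Int × Int)) (r : Nat), r ≤ q.length →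
    (∀ i (h : i < q.length), i < r → pvLtB q[i] item = true) →
    (∀ i (h : i < q.length), r ≤ i → pvLtB q[i] item = false) →
    q.insertIdx r item = pvInsertSorted q item := by
  intro q
  induction q with
  | nil =>
      intro r hr _ _
      have : r = 0 := by simpa using hr
      subst this
      rfl
  | cons h t ih =>
      intro r hr hlo hhi
      rcases h0 : pvLtB h item with _ | _
      · have hr0 : r = 0 := by
          by_contra hne
          have := hlo 0 (by simp) (by omega)
          simp [h0] at this
        subst hr0
        simp [List.insertIdx, pvInsertSorted, h0]
      · rcases r with _ | r'
        · have := hhi 0 (by simp) (by omega)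
          simp [h0] at this
        · simp only [List.insertIdx_succ_cons, pvInsertSorted, h0, if_pos]
          congr 1
          refine ih r' (by simpa using hr) ?_ ?_
          · intro i hi hi'
            have := hlo (i + 1) (by simpa using hi) (by omega)
            simpa using this
          · intro i hi hi'
            have := hhi (i + 1) (by simpa using hi) (by omega)
            simpa using this

-- on a sorted queue, B's binary-search insert is the linear sorted insertion
lemma bisect_insert_eq (q : List (Int × Int)) (item : Int × Int) (hs : q.Pairwise pvLe) :
    q.insertIdx (pvBisect q item 0 q.length) item = pvInsertSorted q item := by
  obtain ⟨h1, h2, h3⟩ := pvBisect_spec q item hs q.length 0 q.length (by omega) (by omega)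
    (by omega) (fun i h hi => by omega) (fun i h hi => by omega)
  exact insertIdx_eq_pvInsertSorted item q _ h1 h2 h3

lemma pairsOf_length (v : List Int) : (pairsOf v).length = v.length := by
  simp [pairsOf]

lemma pairsOf_getElem (v : List Int) (i : Nat) (hi : i < v.length) :
    (pairsOf v)[i]'(by simp [pairsOf_length, hi]) = (v[i], (i : Int)) := by
  simp [pairsOf]

lemma pairsOf_set (v : List Int) (j : Nat) (_hj : j < v.length) (c : Int) :
    pairsOf (v.set j c) = (pairsOf v).set j (c, (j : Int)) := by
  apply List.ext_getElem
  · simp [pairsOf_length]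
  · intro i h1 h2
    have hi : i < v.length := by simpa [pairsOf_length] using h2
    rw [pairsOf_getElem (v.set j c) i (by simpa using hi), List.getElem_set, List.getElem_set]
    by_cases hij : j = i
    · subst hij
      simp
    · rw [if_neg hij, if_neg hij, pairsOf_getElem v i hi]

-- a least element of the pair multiset is unique, and a sorted permutation starts with it
lemma head_is_least {h : Int × Int} {rest L : List (Int × Int)}
    (hs : (h :: rest).Pairwise pvLe) (hp : (h :: rest).Perm L) :
    h ∈ L ∧ ∀ y ∈ L, pvLe h y := by
  refine ⟨hp.mem_iff.mp (by simp), ?_⟩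
  intro y hy
  rcases List.mem_cons.mp (hp.mem_iff.mpr hy) with rfl | hy'
  · rw [pvLe_iff]; right; rfl
  · exact (List.pairwise_cons.mp hs).1 y hy'

-- A's choice (min value, first index of it) is a least element of pairsOf v
lemma min_idx_least {v : List Int} {m : Int} {j : Nat}
    (hm : PySem.List.min? v (fun x => x) = some m)
    (hj : PySem.List.index? v m = some j) :
    ((m, (j : Int)) ∈ pairsOf v ∧ ∀ y ∈ pairsOf v, pvLe (m, (j : Int)) y) := by
  obtain ⟨hjlen, hvj, hfirst⟩ := PySem.List.getElem_of_index?_eq_some hj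
  constructor
  · have := pairsOf_getElem v j hjlen
    rw [hvj] at this
    exact this ▸ List.getElem_mem _
  · intro y hy
    obtain ⟨i, hi, hyi⟩ := List.mem_iff_getElem.mp hy
    have hiv : i < v.length := by simpa [pairsOf_length] using hi
    rw [pairsOf_getElem v i hiv] at hyi
    subst hyi
    have hmin : m ≤ v[i] := PySem.List.min?_isMin hm _ (List.getElem_mem _)
    rw [pvLe_iff]
    simp only [Prod.mk.injEq]
    by_cases hvi : v[i] = m
    · have hji : j ≤ i := by
        by_contra hlt
        exact hfirst i (by omega) hvi
      left; right; exact ⟨hvi.symm, by exact_mod_cast hji⟩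
    · left; left; omega

-- replacing the element at j (first occurrence of e) by y is, up to permutation, erase + cons
lemma set_perm_cons_erase {L : List (Int × Int)} {j : Nat} (hj : j < L.length)
    (e y : Int × Int) (he : L[j] = e) (hfst : e ∉ L.take j) :
    (L.set j y).Perm (y :: L.erase e) := by
  have hdecomp : L = L.take j ++ e :: L.drop (j + 1) := by
    conv_lhs => rw [← List.take_append_drop j L]
    rw [← List.getElem_cons_drop hj, he]
  have hlen : (L.take j).length = j := List.length_take_of_le (Nat.le_of_lt hj)
  have hset : L.set j y = L.take j ++ y :: L.drop (j + 1) := by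
    conv_lhs => rw [hdecomp]
    rw [List.set_append]
    simp [hlen]
  have herase : L.erase e = L.take j ++ L.drop (j + 1) := by
    conv_lhs => rw [hdecomp]
    rw [List.erase_append_right _ hfst, List.erase_cons_head]
  rw [hset, herase]
  exact List.perm_middle.trans (List.Perm.refl _)

lemma first_occ_not_in_take {v : List Int} {m : Int} {j : Nat}
    (hj : PySem.List.index? v m = some j) :
    (m, (j : Int)) ∉ (pairsOf v).take j := by
  obtain ⟨hjlen, -, -⟩ := PySem.List.getElem_of_index?_eq_some hj
  intro hmem
  obtain ⟨i, hi, hyi⟩ := List.mem_iff_getElem.mp hmem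
  have hi' : i < j := by
    have := List.length_take_le j (pairsOf v)
    omega
  rw [List.getElem_take] at hyi
  have hiv : i < v.length := by
    have := hi
    simp [List.length_take, pairsOf_length] at this
    omega
  rw [pairsOf_getElem v i hiv] at hyi
  have : (i : Int) = (j : Int) := congrArg Prod.snd hyi
  omega

-- main loop invariant: same boxes, and B's queue is a sorted permutation of A's (load, index) pairs
lemma pvMain (d : List (String × Int)) :
    ∀ (l : List (String × Int)) (boxes : List (List String)) (v : List Int) (q : List (Int × Int)),
    (∀ p ∈ l, (PySem.Dict.mk d).getD p.1 0 = p.2) →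
    q.Pairwise pvLe → q.Perm (pairsOf v) →
    ((l.map Prod.fst).foldl (pvStepA d) (boxes, v)).1 = (l.foldl pvStepB (boxes, q)).1 := by
  intro l
  induction l with
  | nil => intro boxes v q _ _ _; rfl
  | cons p t ih =>
      intro boxes v q hlk hs hp
      rcases p with ⟨k, w⟩
      simp only [List.map_cons, List.foldl_cons]
      rcases hq : q with _ | ⟨⟨load, idx⟩, rest⟩
      · -- empty queue: v is empty too; both steps are no-ops
        subst hq
        have hv : v = [] := by
          have h := hp.length_eq
          simp only [List.length_nil, pairsOf_length] at h
          exact List.length_eq_zero_iff.mp h.symm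
        subst hv
        have hA : pvStepA d (boxes, ([] : List Int)) k = (boxes, []) := rfl
        have hB : pvStepB (boxes, ([] : List (Int × Int))) (k, w) = (boxes, []) := rfl
        rw [hA, hB]
        exact ih boxes [] [] (fun p hp' => hlk p (List.mem_cons_of_mem _ hp'))
          (List.Pairwise.nil) (List.Perm.refl _)
      · subst hq
        -- v nonempty, so A's min and index exist
        have hvne : v ≠ [] := by
          intro hv
          subst hv
          have : pairsOf ([] : List Int) = [] := rfl
          rw [this] at hp
          exact absurd hp.length_eq (by simp)
        obtain ⟨m, hm⟩ : ∃ m, PySem.List.min? v (fun x => x) = some m := by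
          rcases h : PySem.List.min? v (fun x => x) with _ | m
          · exact absurd ((PySem.List.min?_eq_none_iff _ _).mp h) hvne
          · exact ⟨m, rfl⟩
        have hmem : m ∈ v := PySem.List.min?_mem hm
        obtain ⟨j, hj⟩ : ∃ j, PySem.List.index? v m = some j := by
          rcases h : PySem.List.index? v m with _ | j
          · exact absurd ((PySem.List.index?_eq_none_iff _ _).mp h) (by simpa using hmem)
          · exact ⟨j, rfl⟩
        obtain ⟨hjlen, hvj, _⟩ := PySem.List.getElem_of_index?_eq_some hj
        -- the queue head is exactly (m, j)
        obtain ⟨hhmem, hhle⟩ := head_is_least hs hp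
        obtain ⟨hmj_mem, hmj_le⟩ := min_idx_least hm hj
        have hhead : ((load, idx) : Int × Int) = (m, (j : Int)) :=
          pvLe_antisymm (hhle _ hmj_mem) (hmj_le _ hhmem)
        rw [Prod.mk.injEq] at hhead
        obtain ⟨rfl, rfl⟩ := hhead
        -- the two step results
        have hw : (PySem.Dict.mk d).getD k 0 = w := hlk (k, w) (List.mem_cons_self)
        have hA : pvStepA d (boxes, v) k =
            (boxes.set j (boxes.getD j [] ++ [k]), v.set j (load + w)) := by
          unfold pvStepA
          rw [hm]
          simp only [hj, Option.getD_some, hw]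
          congr 2
          rw [List.getD_eq_getElem?_getD, List.getElem?_eq_getElem hjlen, Option.getD_some, hvj]
        have hrest_pw : rest.Pairwise pvLe := (List.pairwise_cons.mp hs).2
        have hB : pvStepB (boxes, (load, (j : Int)) :: rest) (k, w) =
            (boxes.set j (boxes.getD j [] ++ [k]), pvInsertSorted rest (load + w, (j : Int))) := by
          simp only [pvStepB]
          rw [bisect_insert_eq rest _ hrest_pw]
          simp
        rw [hA, hB]
        have hrest_perm : rest.Perm ((pairsOf v).erase (load, (j : Int))) :=
          (List.cons_perm_iff_perm_erase.mp hp).2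
        have hperm' : (pvInsertSorted rest (load + w, (j : Int))).Perm (pairsOf (v.set j (load + w))) := by
          have h1 := perm_pvInsertSorted rest (load + w, (j : Int))
          have h2 : ((load + w, (j : Int)) :: rest).Perm
              ((load + w, (j : Int)) :: (pairsOf v).erase (load, (j : Int))) := hrest_perm.cons _
          have h3 : (pairsOf (v.set j (load + w))).Perm
              ((load + w, (j : Int)) :: (pairsOf v).erase (load, (j : Int))) := by
            rw [pairsOf_set v j hjlen]
            refine set_perm_cons_erase (by simpa [pairsOf_length] using hjlen) _ _ ?_ ?_
            · rw [pairsOf_getElem v j hjlen, hvj]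
            · exact first_occ_not_in_take hj
          exact (h1.trans h2).trans h3.symm
        exact ih _ _ _ (fun p hp' => hlk p (List.mem_cons_of_mem _ hp'))
          (pairwise_pvInsertSorted _ hrest_pw) hperm'

-- the initial queue is exactly the initial pair list, and it is sorted
lemma init_queue_eq (nbBoxes : Int) :
    (PySem.List.pyRange 0 nbBoxes 1).map (fun i => ((0 : Int), i)) =
      pairsOf (List.replicate nbBoxes.toNat 0) := by
  apply List.ext_getElem
  · simp [pairsOf_length, PySem.List.length_pyRange_one]
  · intro i h1 h2
    have hi : i < nbBoxes.toNat := by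
      simpa [PySem.List.length_pyRange_one] using h1
    rw [List.getElem_map, PySem.List.getElem_pyRange_one,
      pairsOf_getElem _ _ (by simpa [pairsOf_length] using h2)]
    simp

lemma init_queue_sorted (nbBoxes : Int) :
    ((PySem.List.pyRange 0 nbBoxes 1).map (fun i => ((0 : Int), i))).Pairwise pvLe := by
  rw [List.pairwise_map]
  refine (PySem.List.pairwise_lt_pyRange_one 0 nbBoxes).imp ?_
  intro a b hab
  rw [pvLe_iff]
  left; right
  exact ⟨rfl, le_of_lt hab⟩

-- ===== VERDICT (by name: the statement is the Claim_ definition above) =====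
theorem fillBoxesStrategy2_spec : Claim_equal_fillBoxesStrategy2 := by
  intro d nb _ hpre
  rcases hpre with ⟨hnodup, _⟩
  show fillBoxesStrategy2 d nb = fillBoxesStrategy2_alt d nb
  unfold fillBoxesStrategy2 fillBoxesStrategy2_alt
  simp only [PySem.Dict.keys_mk]
  refine pvMain d d _ _ _ ?_ (init_queue_sorted nb) (by rw [init_queue_eq])
  intro p hp
  refine PySem.Dict.getD_of_mem_items (PySem.Dict.mk d) ?_ ?_ 0
  · exact hp
  · simpa [PySem.Dict.keys_mk] using hnodup
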